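-- pv_equiv track=rewrite | github.com/twezo1337/optimal-processing-sequence | method_functions.py | rec3_sokol
-- ===== SOURCE A (Python) =====
-- import copy
--
-- def rec3_sokol(matr):
--     r = []
--     diff = []
--
--     for i in range(len(matr[0])):
--         diff1 = 0
--         diff2 = 0
--         for j in range(len(matr)):
--             if j == 0:
--                 diff1 = matr[j][i]
--             elif j == len(matr) - 1:
--                 diff2 = matr[j][i]
--         diff3 = diff2 - diff1
--         diff.append(diff3)
--
--     diffcopy = copy.deepcopy(diff)
--     diffcopy.sort()
--     diffcopy.reverse()
--
--     for k in diffcopy: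
--         for i in range(len(matr[0])):
--             diff1 = 0
--             diff2 = 0
--             for j in range(len(matr)):
--                 if j == 0:
--                     diff1 = matr[j][i]
--                 elif j == len(matr) - 1:
--                     diff2 = matr[j][i]
--             if diff2 - diff1 == k:
--                 r.append(i)
--
--     r = list(dict.fromkeys(r))
--
--     return r
-- ===== SOURCE B (Python) =====
-- def rec3_sokol(matr):
--     first = matr[0]
--     last = matr[len(matr) - 1]
--     diffs = [last[i] - first[i] for i in range(len(first))]
--     return sorted(range(len(first)), key=lambda i: (-diffs[i], i))
-- ===== Notes on version B (the rewrite author's own statement) =====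
-- stated objective: faster
-- what changed: B computes each column's last-minus-first difference once and stable-sorts the column indices by (-diff, index), instead of A's rescanning all rows per column, re-deriving the diff of every column once per entry of the descending-sorted diff list, and deduplicating afterwards.
-- intended difference: On single-row matrices whose row is not non-decreasing, A's leftover diff2=0 makes it order indices by ascending first-row value, while B uses the intended last-minus-first difference (0 for one row) and returns the identity order 0..m-1, which is the intended 'sort by difference' behaviour. — e.g. on rec3_sokol([[2, 1]]): A returns [1, 0], B returns [0, 1]
-- outside the precondition, e.g. on rec3_sokol([]): A raises IndexError, B raises IndexError; on rec3_sokol([[1, 2], [3]]): A raises IndexError, B raises IndexError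
import Mathlib
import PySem

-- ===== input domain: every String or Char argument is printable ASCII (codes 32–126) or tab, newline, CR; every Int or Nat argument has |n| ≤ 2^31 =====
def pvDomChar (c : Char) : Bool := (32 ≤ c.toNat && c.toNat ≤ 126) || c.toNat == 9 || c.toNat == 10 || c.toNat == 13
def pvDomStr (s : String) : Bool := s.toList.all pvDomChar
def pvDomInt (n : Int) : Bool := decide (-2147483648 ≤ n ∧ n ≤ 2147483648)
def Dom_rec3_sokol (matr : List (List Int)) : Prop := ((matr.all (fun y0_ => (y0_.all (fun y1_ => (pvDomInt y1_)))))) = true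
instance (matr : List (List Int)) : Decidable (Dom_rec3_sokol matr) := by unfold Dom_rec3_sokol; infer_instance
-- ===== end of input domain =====

-- B replaces A's per-diff-value rescans and final dedup by one diff pass and one stable index sort by (-diff, index).
-- ===== PORT A =====
-- inner j-loop of A (appears twice, verbatim, in A): scan rows keeping diff1 = row0 value, diff2 = last-row value
def pvColDiff (matr : List (List Int)) (i : Int) : Int :=
  let st := (PySem.List.pyRange 0 (matr.length : Int)).foldl
    (fun (st : Int × Int) j =>
      if j = 0 then (PySem.List.pyGetD (PySem.List.pyGetD matr j []) i 0, st.2)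
      else if j = (matr.length : Int) - 1 then (st.1, PySem.List.pyGetD (PySem.List.pyGetD matr j []) i 0)
      else st) ((0 : Int), (0 : Int))
  st.2 - st.1

def rec3_sokol (matr : List (List Int)) : List Int :=
  let m : Int := ((PySem.List.pyGetD matr 0 []).length : Int)
  let diff := (PySem.List.pyRange 0 m).foldl (fun acc i => acc ++ [pvColDiff matr i]) []
  let diffcopy := (PySem.List.sorted diff (fun x => x)).reverse
  let r := diffcopy.foldl (fun acc k =>
      (PySem.List.pyRange 0 m).foldl
        (fun acc2 i => if pvColDiff matr i = k then acc2 ++ [i] else acc2) acc) []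
  PySem.List.dedup r

-- ===== PORT B =====
def rec3_sokol_alt (matr : List (List Int)) : List Int :=
  let first := PySem.List.pyGetD matr 0 []
  let last := PySem.List.pyGetD matr ((matr.length : Int) - 1) []
  let diffs := (PySem.List.pyRange 0 (first.length : Int)).map
      (fun i => PySem.List.pyGetD last i 0 - PySem.List.pyGetD first i 0)
  PySem.List.sorted2 (PySem.List.pyRange 0 (first.length : Int))
      (fun i => -(PySem.List.pyGetD diffs i 0)) (fun i => i)

-- ===== PRECONDITION & SPEC =====
-- Pre_ excludes exactly the inputs where A raises IndexError: the empty matrix (matr[0]) and a last row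
-- shorter than the first row (matr[-1][i] for i < len(matr[0])).
def Pre_rec3_sokol (matr : List (List Int)) : Prop :=
  matr ≠ [] ∧ (matr.headD []).length ≤ (matr.getLastD []).length
instance (matr : List (List Int)) : Decidable (Pre_rec3_sokol matr) := by unfold Pre_rec3_sokol; infer_instance
def pvWitness_rec3_sokol : List (List Int) := [[1, 2], [3, 4]]

-- On single-row matrices whose row is not non-decreasing, A's leftover diff2 = 0 orders the indices by
-- ascending first-row value, while B uses the intended last-minus-first difference (0 for a single row)
-- and returns the identity order 0..m-1, the intended behaviour of 'sort by difference'.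
def D_rec3_sokol (matr : List (List Int)) : Prop :=
  matr.length = 1 ∧ ¬ (matr.headD []).Pairwise (· ≤ ·)
instance (matr : List (List Int)) : Decidable (D_rec3_sokol matr) := by unfold D_rec3_sokol; infer_instance

def Spec_rec3_sokol (matr : List (List Int)) (out : List Int) : Prop :=
  ¬ D_rec3_sokol matr → out = rec3_sokol_alt matr
instance (matr : List (List Int)) (out : List Int) : Decidable (Spec_rec3_sokol matr out) := by unfold Spec_rec3_sokol; infer_instance

def pvDiffWitness_rec3_sokol : List (List Int) := [[2, 1]]
def pvDiffWitnessOut_rec3_sokol : (List Int) × (List Int) := ([1, 0], [0, 1])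

-- ===== CLAIM (what is proved, stated in full; the proofs are below) =====
def Claim_unchanged_rec3_sokol : Prop := ∀ (matr : List (List Int)), Dom_rec3_sokol matr → Pre_rec3_sokol matr → Spec_rec3_sokol matr (rec3_sokol matr)
def Claim_changed_rec3_sokol : Prop := Dom_rec3_sokol (pvDiffWitness_rec3_sokol) ∧ Pre_rec3_sokol (pvDiffWitness_rec3_sokol) ∧ D_rec3_sokol (pvDiffWitness_rec3_sokol) ∧ rec3_sokol (pvDiffWitness_rec3_sokol) = pvDiffWitnessOut_rec3_sokol.1 ∧ rec3_sokol_alt (pvDiffWitness_rec3_sokol) = pvDiffWitnessOut_rec3_sokol.2 ∧ pvDiffWitnessOut_rec3_sokol.1 ≠ pvDiffWitnessOut_rec3_sokol.2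
def Claim_exact_rec3_sokol : Prop := ∀ (matr : List (List Int)), Dom_rec3_sokol matr → Pre_rec3_sokol matr → D_rec3_sokol matr → rec3_sokol matr ≠ rec3_sokol_alt matr

-- ===== LEMMAS AND PROOFS =====


-- proof-only helpers and lemmas

-- the strict order "first by key K ascending, ties by index ascending"
def pvLt (K : Int → Int) (i j : Int) : Prop := K i < K j ∨ (K i = K j ∧ i < j)

-- the comparison sorted2 uses for keys (K i, i)
def pvBefore (K : Int → Int) (a b : Int) : Bool :=
  decide (K a < K b) || (!decide (K b < K a) && decide (a < b))

lemma pvLt_irrefl (K : Int → Int) (a : Int) : ¬ pvLt K a a := by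
  unfold pvLt; omega

lemma pvLt_of_before_false (K : Int → Int) (a b : Int)
    (h : pvBefore K b a = false) (hne : a ≠ b) : pvLt K a b := by
  unfold pvBefore at h
  unfold pvLt
  simp only [Bool.or_eq_false_iff, Bool.and_eq_false_iff, decide_eq_false_iff_not,
    Bool.not_eq_false', decide_eq_true_eq] at h
  rcases h with ⟨h1, h2⟩
  rcases h2 with h2 | h2 <;> omega

-- ---------- dedup structure (PySem.List.dedup keeps first occurrences) ----------

lemma pvSetAdd_mem (acc : List Int) (x : Int) (h : x ∈ acc) : PySem.Set.add acc x = acc := by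
  simp [PySem.Set.add, PySem.Set.contains, h]

lemma pvSetAdd_not_mem (acc : List Int) (x : Int) (h : x ∉ acc) :
    PySem.Set.add acc x = acc ++ [x] := by
  simp [PySem.Set.add, PySem.Set.contains, h]

lemma pvFoldlAdd (xs : List Int) : ∀ acc : List Int,
    xs.foldl PySem.Set.add acc = acc ++ (PySem.List.dedup xs).filter (fun y => decide (y ∉ acc)) := by
  induction xs with
  | nil => intro acc; simp [PySem.List.dedup, PySem.Set.ofList]
  | cons x xs ih =>
    intro acc
    have hded : PySem.List.dedup (x :: xs) =
        x :: (PySem.List.dedup xs).filter (fun y => decide (y ≠ x)) := by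
      show (x :: xs).foldl PySem.Set.add [] = _
      rw [List.foldl_cons, pvSetAdd_not_mem [] x (by simp), List.nil_append, ih [x]]
      simp
    rw [List.foldl_cons, ih (PySem.Set.add acc x), hded]
    by_cases hm : x ∈ acc
    · rw [pvSetAdd_mem acc x hm]
      have hxf : decide (x ∉ acc) = false := by simp [hm]
      rw [List.filter_cons, hxf, if_neg (by simp), List.filter_filter]
      congr 1
      apply List.filter_congr
      intro y _
      by_cases h1 : y ∈ acc <;> by_cases h2 : y = x
      · simp [h1]
      · simp [h1]
      · exact absurd (h2 ▸ hm) h1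
      · simp [h1, h2]
    · rw [pvSetAdd_not_mem acc x hm]
      have hxt : decide (x ∉ acc) = true := by simp [hm]
      rw [List.filter_cons, hxt, if_pos rfl, List.filter_filter, List.append_assoc,
        List.singleton_append]
      congr 2
      apply List.filter_congr
      intro y _
      by_cases h1 : y ∈ acc <;> by_cases h2 : y = x <;> simp [h1, h2]

lemma pvDedup_cons (x : Int) (xs : List Int) :
    PySem.List.dedup (x :: xs) = x :: (PySem.List.dedup xs).filter (fun y => decide (y ≠ x)) := by
  show (x :: xs).foldl PySem.Set.add [] = _
  rw [List.foldl_cons, pvSetAdd_not_mem [] x (by simp), List.nil_append, pvFoldlAdd xs [x]]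
  simp

lemma pvDedup_append (xs ys : List Int) :
    PySem.List.dedup (xs ++ ys) =
      PySem.List.dedup xs ++ (PySem.List.dedup ys).filter (fun y => decide (y ∉ xs)) := by
  have h1 : PySem.List.dedup (xs ++ ys) = ys.foldl PySem.Set.add (PySem.List.dedup xs) :=
    List.foldl_append
  rw [h1, pvFoldlAdd ys (PySem.List.dedup xs)]
  congr 1
  apply List.filter_congr
  intro y _
  simp

lemma pvDedup_sublist (xs : List Int) : (PySem.List.dedup xs).Sublist xs := by
  induction xs with
  | nil => simp [PySem.List.dedup, PySem.Set.ofList]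
  | cons x xs ih =>
    rw [pvDedup_cons]
    exact List.Sublist.cons₂ x (List.Sublist.trans List.filter_sublist ih)

lemma pvDedup_eq_self (xs : List Int) (h : xs.Nodup) : PySem.List.dedup xs = xs := by
  induction xs with
  | nil => simp [PySem.List.dedup, PySem.Set.ofList]
  | cons x xs ih =>
    rw [pvDedup_cons, ih h.of_cons]
    have : ∀ y ∈ xs, decide (y ≠ x) = true := by
      intro y hy
      simp only [decide_eq_true_eq]
      rintro rfl
      exact (h.notMem) hy
    rw [List.filter_eq_self.mpr this]

lemma pvFilter_flatMap (f : Int → List Int) (k : Int)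
    (hdisj : ∀ k k' x, x ∈ f k → x ∈ f k' → k = k') :
    ∀ l : List Int,
      (l.flatMap f).filter (fun x => decide (x ∉ f k)) = (l.filter (fun k' => decide (k' ≠ k))).flatMap f := by
  intro l
  induction l with
  | nil => simp
  | cons k' l ih =>
    rw [List.flatMap_cons, List.filter_append, ih, List.filter_cons]
    by_cases hk : k' = k
    · subst hk
      have : (f k').filter (fun x => decide (x ∉ f k')) = [] := by
        apply List.filter_eq_nil_iff.mpr
        intro x hx
        simp [hx]
      rw [this, if_neg (by simp), List.nil_append]
    · have : (f k').filter (fun x => decide (x ∉ f k)) = f k' := by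
        apply List.filter_eq_self.mpr
        intro x hx
        simp only [decide_eq_true_eq]
        intro hxk
        exact hk (hdisj k' k x hx hxk)
      rw [this, if_pos (by simp [hk]), List.flatMap_cons]

lemma pvDedup_flatMap (f : Int → List Int)
    (hnodup : ∀ k, (f k).Nodup)
    (hdisj : ∀ k k' x, x ∈ f k → x ∈ f k' → k = k') :
    ∀ ks : List Int, PySem.List.dedup (ks.flatMap f) = (PySem.List.dedup ks).flatMap f := by
  intro ks
  induction ks with
  | nil => simp [PySem.List.dedup, PySem.Set.ofList]
  | cons k ks ih =>
    rw [List.flatMap_cons, pvDedup_append, ih, pvDedup_eq_self _ (hnodup k), pvDedup_cons,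
      List.flatMap_cons]
    congr 1
    exact pvFilter_flatMap f k hdisj _

-- ---------- insertion-sort (sorted2) order invariant ----------

lemma pvInsertBy_pairwise (K : Int → Int) (x : Int) :
    ∀ acc : List Int, acc.Pairwise (fun a b => pvBefore K b a = false) →
      (PySem.List.insertBy (pvBefore K) x acc).Pairwise (fun a b => pvBefore K b a = false) := by
  intro acc
  induction acc with
  | nil =>
    intro _
    simp [PySem.List.insertBy]
  | cons y ys ih =>
    intro h
    rw [List.pairwise_cons] at h
    by_cases hxy : pvBefore K x y = true
    · have hred : PySem.List.insertBy (pvBefore K) x (y :: ys) = x :: y :: ys := by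
        simp [PySem.List.insertBy, hxy]
      rw [hred, List.pairwise_cons]
      constructor
      · intro z hz
        rcases List.mem_cons.mp hz with rfl | hz
        · -- before y x = false from asymmetry
          unfold pvBefore at hxy ⊢
          simp only [Bool.or_eq_true, Bool.and_eq_true, Bool.not_eq_true', decide_eq_true_eq,
            decide_eq_false_iff_not, Bool.or_eq_false_iff, Bool.and_eq_false_iff,
            Bool.not_eq_false', decide_eq_false_iff_not] at hxy ⊢
          omega
        · -- before z x = false  from  before x y  and  before z y = false
          have hzy := h.1 z hz
          unfold pvBefore at hxy hzy ⊢
          simp only [Bool.or_eq_true, Bool.and_eq_true, Bool.not_eq_true', decide_eq_true_eq,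
            decide_eq_false_iff_not, Bool.or_eq_false_iff, Bool.and_eq_false_iff,
            Bool.not_eq_false', decide_eq_false_iff_not] at hxy hzy ⊢
          omega
      · exact List.pairwise_cons.mpr h
    · have hred : PySem.List.insertBy (pvBefore K) x (y :: ys) =
          y :: PySem.List.insertBy (pvBefore K) x ys := by
        simp [PySem.List.insertBy, hxy]
      rw [hred, List.pairwise_cons]
      constructor
      · intro z hz
        rcases (PySem.List.mem_insertBy _ _ _ _).mp hz with rfl | hz
        · simpa using hxy
        · exact h.1 z hz
      · exact ih h.2

lemma pvSorted2_pairwise_before (K : Int → Int) (xs : List Int) :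
    (PySem.List.sorted2 xs K (fun i => i)).Pairwise (fun a b => pvBefore K b a = false) := by
  have hgen : ∀ (l acc : List Int), acc.Pairwise (fun a b => pvBefore K b a = false) →
      (l.foldl (fun acc x => PySem.List.insertBy (pvBefore K) x acc) acc).Pairwise
        (fun a b => pvBefore K b a = false) := by
    intro l
    induction l with
    | nil => intro acc h; simpa using h
    | cons x l ih =>
      intro acc h
      rw [List.foldl_cons]
      exact ih _ (pvInsertBy_pairwise K x acc h)
  have : PySem.List.sorted2 xs K (fun i => i) =
      xs.foldl (fun acc x => PySem.List.insertBy (pvBefore K) x acc) [] := rfl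
  rw [this]
  exact hgen xs [] (by simp)

lemma pvSorted2_pairwise_lt (K : Int → Int) (xs : List Int) (hx : xs.Nodup) :
    (PySem.List.sorted2 xs K (fun i => i)).Pairwise (pvLt K) := by
  have hnd : (PySem.List.sorted2 xs K (fun i => i)).Nodup :=
    ((PySem.List.sorted2_perm xs K (fun i => i) false).nodup_iff).mpr hx
  have := (pvSorted2_pairwise_before K xs).and hnd
  exact this.imp (fun {a b} h => pvLt_of_before_false K a b h.1 h.2)

-- ---------- the index range 0..m-1 ----------

def pvR (m : Nat) : List Int := PySem.List.pyRange 0 (m : Int)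

lemma pvR_eq (m : Nat) : pvR m = (List.range m).map (fun k : Nat => (k : Int)) :=
  PySem.List.pyRange_zero_natCast m

lemma pvR_pairwise (m : Nat) : (pvR m).Pairwise (· < ·) := by
  rw [pvR_eq]
  exact List.pairwise_lt_range.map _ (fun _ _ h => by exact_mod_cast h)

lemma pvR_nodup (m : Nat) : (pvR m).Nodup :=
  (pvR_pairwise m).imp (fun {_ _} h => ne_of_lt h)

lemma pvR_mem (m : Nat) (i : Int) : i ∈ pvR m ↔ 0 ≤ i ∧ i < m :=
  PySem.List.mem_pyRange_one

-- ---------- A's result in closed shape ----------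

lemma pvA_shape (matr : List (List Int)) :
    rec3_sokol matr =
      PySem.List.dedup
        (((PySem.List.sorted ((pvR (PySem.List.pyGetD matr 0 []).length).map (pvColDiff matr)) (fun x => x)).reverse).flatMap
          (fun k => (pvR (PySem.List.pyGetD matr 0 []).length).filter (fun i => decide (pvColDiff matr i = k)))) := by
  show PySem.List.dedup _ = _
  rw [pvR]
  congr 1
  rw [PySem.List.foldl_append_singleton_eq_map, List.nil_append]
  rw [show (fun (acc : List Int) (k : Int) =>
        (PySem.List.pyRange 0 ((PySem.List.pyGetD matr 0 []).length : Int)).foldl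
          (fun acc2 i => if pvColDiff matr i = k then acc2 ++ [i] else acc2) acc) =
      (fun acc k => acc ++ (PySem.List.pyRange 0 ((PySem.List.pyGetD matr 0 []).length : Int)).filter
          (fun i => decide (pvColDiff matr i = k))) from by
    funext acc k
    exact PySem.List.foldl_append_ite_eq_filter _ _ _]
  rw [PySem.List.foldl_append_eq_flatMap, List.nil_append]

-- A's flatMap over the deduplicated descending diff values: ordered by pvLt, permutation of the range
lemma pvFlatMap_pairwise (D K : Int → Int) (m : Nat)
    (Hmono : ∀ i j : Int, i ∈ pvR m → j ∈ pvR m → (D j < D i ∨ (D i = D j ∧ i < j)) → pvLt K i j) :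
    ∀ ks : List Int, ks.Pairwise (fun a b => b < a) →
      (ks.flatMap (fun k => (pvR m).filter (fun i => decide (D i = k)))).Pairwise (pvLt K) := by
  intro ks
  induction ks with
  | nil => simp
  | cons k ks ih =>
    intro h
    rw [List.pairwise_cons] at h
    rw [List.flatMap_cons, List.pairwise_append]
    refine ⟨?_, ih h.2, ?_⟩
    · -- inside the block of k: indices ascending, equal D
      have hpw : ((pvR m).filter (fun i => decide (D i = k))).Pairwise (· < ·) :=
        (pvR_pairwise m).filter _
      refine hpw.imp_of_mem ?_
      intro a b ha hb hab
      have ha' := List.mem_filter.mp ha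
      have hb' := List.mem_filter.mp hb
      exact Hmono a b ha'.1 hb'.1 (Or.inr ⟨by
        have := ha'.2; have := hb'.2
        simp only [decide_eq_true_eq] at *
        omega, hab⟩)
    · -- across blocks: strictly larger diff first
      intro a ha b hb
      have ha' := List.mem_filter.mp ha
      rw [List.mem_flatMap] at hb
      obtain ⟨k', hk', hbk'⟩ := hb
      have ha' := List.mem_filter.mp ha
      have hb' := List.mem_filter.mp hbk'
      have hDa : D a = k := by have := ha'.2; simpa using this
      have hDb : D b = k' := by have := hb'.2; simpa using this
      exact Hmono a b ha'.1 hb'.1 (Or.inl (by rw [hDa, hDb]; exact h.1 k' hk'))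



-- A's deduplicated flatMap: pairwise-ordered by pvLt K and a permutation of the index range
lemma pvA_props (D K : Int → Int) (m : Nat)
    (Hmono : ∀ i j : Int, i ∈ pvR m → j ∈ pvR m → (D j < D i ∨ (D i = D j ∧ i < j)) → pvLt K i j) :
    (PySem.List.dedup (((PySem.List.sorted ((pvR m).map D) (fun x => x)).reverse).flatMap
        (fun k => (pvR m).filter (fun i => decide (D i = k))))).Pairwise (pvLt K) ∧
    (PySem.List.dedup (((PySem.List.sorted ((pvR m).map D) (fun x => x)).reverse).flatMap
        (fun k => (pvR m).filter (fun i => decide (D i = k))))).Perm (pvR m) := by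
  have hfnodup : ∀ k, ((pvR m).filter (fun i => decide (D i = k))).Nodup :=
    fun k => (pvR_nodup m).filter _
  have hfd : ∀ k k' x, x ∈ (pvR m).filter (fun i => decide (D i = k)) →
      x ∈ (pvR m).filter (fun i => decide (D i = k')) → k = k' := by
    intro k k' x hx hx'
    have h1 := (List.mem_filter.mp hx).2
    have h2 := (List.mem_filter.mp hx').2
    simp only [decide_eq_true_eq] at h1 h2
    omega
  rw [pvDedup_flatMap _ hfnodup hfd]
  have hdesc : (PySem.List.dedup ((PySem.List.sorted ((pvR m).map D) (fun x => x)).reverse)).Pairwise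
      (fun a b => b < a) := by
    have h1 : ((PySem.List.sorted ((pvR m).map D) (fun x => x)).reverse).Pairwise (fun a b => b ≤ a) :=
      List.pairwise_reverse.mpr (PySem.List.sorted_pairwise ((pvR m).map D) (fun x => x))
    have h2 := List.Pairwise.sublist (pvDedup_sublist _) h1
    have h3 : (PySem.List.dedup ((PySem.List.sorted ((pvR m).map D) (fun x => x)).reverse)).Pairwise
        (fun a b : Int => a ≠ b) := PySem.List.nodup_dedup _
    exact (h2.and h3).imp (fun {a b} h => lt_of_le_of_ne h.1 (Ne.symm h.2))
  have hpw := pvFlatMap_pairwise D K m Hmono _ hdesc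
  refine ⟨hpw, ?_⟩
  have hnd : ((PySem.List.dedup ((PySem.List.sorted ((pvR m).map D) (fun x => x)).reverse)).flatMap
      (fun k => (pvR m).filter (fun i => decide (D i = k)))).Nodup :=
    hpw.imp (fun {a b} h => by rintro rfl; exact pvLt_irrefl K a h)
  rw [List.perm_ext_iff_of_nodup hnd (pvR_nodup m)]
  intro x
  constructor
  · intro hx
    rw [List.mem_flatMap] at hx
    obtain ⟨k, _, hxk⟩ := hx
    exact (List.mem_filter.mp hxk).1
  · intro hx
    rw [List.mem_flatMap]
    refine ⟨D x, ?_, List.mem_filter.mpr ⟨hx, by simp⟩⟩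
    rw [PySem.List.mem_dedup, List.mem_reverse, PySem.List.mem_sorted]
    exact List.mem_map_of_mem hx

-- equality of the two shapes
lemma pvMain (D K : Int → Int) (m : Nat)
    (Hmono : ∀ i j : Int, i ∈ pvR m → j ∈ pvR m → (D j < D i ∨ (D i = D j ∧ i < j)) → pvLt K i j) :
    PySem.List.dedup (((PySem.List.sorted ((pvR m).map D) (fun x => x)).reverse).flatMap
        (fun k => (pvR m).filter (fun i => decide (D i = k))))
      = PySem.List.sorted2 (pvR m) K (fun i => i) := by
  obtain ⟨hpwA, hpermA⟩ := pvA_props D K m Hmono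
  have hpermB : (PySem.List.sorted2 (pvR m) K (fun i => i)).Perm (pvR m) :=
    PySem.List.sorted2_perm _ _ _ _
  have hpwB := pvSorted2_pairwise_lt K (pvR m) (pvR_nodup m)
  exact List.Perm.eq_of_pairwise
    (fun a b _ _ h h' => by unfold pvLt at h h'; omega) hpwA hpwB (hpermA.trans hpermB.symm)

-- ---------- evaluating A's inner row scan ----------

lemma pvFold_eval (matr : List (List Int)) (i : Int) (h2 : 2 ≤ matr.length) :
    (PySem.List.pyRange 0 (matr.length : Int)).foldl
      (fun (st : Int × Int) j =>
        if j = 0 then (PySem.List.pyGetD (PySem.List.pyGetD matr j []) i 0, st.2)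
        else if j = (matr.length : Int) - 1 then (st.1, PySem.List.pyGetD (PySem.List.pyGetD matr j []) i 0)
        else st) ((0 : Int), (0 : Int))
    = (PySem.List.pyGetD (PySem.List.pyGetD matr 0 []) i 0,
       PySem.List.pyGetD (PySem.List.pyGetD matr ((matr.length : Int) - 1) []) i 0) := by
  obtain ⟨k, hk⟩ : ∃ k, matr.length = k + 2 := ⟨matr.length - 2, by omega⟩
  set F := fun (st : Int × Int) (j : Int) =>
      if j = 0 then (PySem.List.pyGetD (PySem.List.pyGetD matr j []) i 0, st.2)
      else if j = (matr.length : Int) - 1 then (st.1, PySem.List.pyGetD (PySem.List.pyGetD matr j []) i 0)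
      else st with hF
  have hrange : PySem.List.pyRange 0 (matr.length : Int) =
      (0 : Int) :: (((List.range k).map (fun x => ((x + 1 : Nat) : Int))) ++ [((k + 1 : Nat) : Int)]) := by
    rw [hk, PySem.List.pyRange_zero_natCast]
    rw [List.range_succ_eq_map, List.range_succ]
    simp [List.map_map, Function.comp_def, Nat.succ_eq_add_one]
  rw [hrange, List.foldl_cons, List.foldl_append, List.foldl_map]
  have h1 : F ((0 : Int), (0 : Int)) 0 = (PySem.List.pyGetD (PySem.List.pyGetD matr 0 []) i 0, 0) := by
    rw [hF]; simp
  have hmid : ∀ (st : Int × Int), ∀ x ∈ List.range k,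
      F st ((x + 1 : Nat) : Int) = st := by
    intro st x hx
    have hxk := List.mem_range.mp hx
    rw [hF]
    simp only
    rw [if_neg (by push_cast; omega), if_neg (by rw [hk]; push_cast; omega)]
  rw [h1, PySem.List.foldl_congr_mem _ _ (fun st _ => st) _ hmid, PySem.List.foldl_ignore,
    List.foldl_cons, List.foldl_nil, hF]
  simp only
  rw [if_neg (by push_cast; omega), if_pos (by rw [hk]; push_cast; omega)]
  rw [hk]
  push_cast
  ring_nf

lemma pvColDiff_ge2 (matr : List (List Int)) (h2 : 2 ≤ matr.length) (i : Int) :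
    pvColDiff matr i =
      PySem.List.pyGetD (PySem.List.pyGetD matr ((matr.length : Int) - 1) []) i 0 -
        PySem.List.pyGetD (PySem.List.pyGetD matr 0 []) i 0 := by
  unfold pvColDiff
  rw [pvFold_eval matr i h2]

lemma pvColDiff_single (a : List Int) (i : Int) :
    pvColDiff [a] i = -(PySem.List.pyGetD a i 0) := by
  unfold pvColDiff
  rw [show ((List.length [a] : Nat) : Int) = ((1 : Nat) : Int) by norm_num]
  rw [PySem.List.pyRange_zero_natCast 1]
  simp

-- ---------- B's result in closed shape ----------

def pvK (matr : List (List Int)) (i : Int) : Int :=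
  -(PySem.List.pyGetD
      ((pvR (PySem.List.pyGetD matr 0 []).length).map
        (fun i => PySem.List.pyGetD (PySem.List.pyGetD matr ((matr.length : Int) - 1) []) i 0 -
          PySem.List.pyGetD (PySem.List.pyGetD matr 0 []) i 0)) i 0)

lemma pvB_shape (matr : List (List Int)) :
    rec3_sokol_alt matr =
      PySem.List.sorted2 (pvR (PySem.List.pyGetD matr 0 []).length) (pvK matr) (fun i => i) := rfl

lemma pvK_eval (matr : List (List Int)) (p : Nat) (hp : p < (PySem.List.pyGetD matr 0 []).length) :
    pvK matr ((p : Nat) : Int) =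
      -(PySem.List.pyGetD (PySem.List.pyGetD matr ((matr.length : Int) - 1) []) (p : Int) 0 -
        PySem.List.pyGetD (PySem.List.pyGetD matr 0 []) (p : Int) 0) := by
  unfold pvK pvR
  rw [PySem.List.pyGetD_map_pyRange _ _ p _ hp]

lemma pvFirst (a : List Int) (t : List (List Int)) : PySem.List.pyGetD (a :: t) (0 : Int) [] = a := by
  simp [pysem]

lemma pvR_length (m : Nat) : (pvR m).length = m := by rw [pvR_eq]; simp

lemma pvR_getElem (m : Nat) (x : Nat) (h : x < (pvR m).length) : (pvR m)[x] = (x : Int) := by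
  simp [pvR_eq]

lemma pvK_single (a : List Int) (r : Nat) (hr : r < a.length) : pvK [a] ((r : Nat) : Int) = 0 := by
  rw [pvK_eval [a] r (by simpa [pvFirst] using hr)]
  rw [show ((List.length [a] : Nat) : Int) - 1 = (0 : Int) by norm_num, pvFirst]
  ring

lemma pvGetD_elem (a : List Int) (r : Nat) (hr : r < a.length) :
    PySem.List.pyGetD a ((r : Nat) : Int) 0 = a[r] := by
  rw [PySem.List.pyGetD_natCast, List.getD_eq_getElem a 0 hr]


-- ===== VERDICT (by name: the statement is the Claim_ definition above) =====
theorem rec3_sokol_spec : Claim_unchanged_rec3_sokol := by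
  unfold Claim_unchanged_rec3_sokol
  intro matr _ _ hND
  rw [pvA_shape, pvB_shape]
  apply pvMain
  intro i j hi hj hcase
  obtain ⟨hi0, him⟩ := (pvR_mem _ i).mp hi
  obtain ⟨hj0, hjm⟩ := (pvR_mem _ j).mp hj
  obtain ⟨p, rfl⟩ : ∃ p : Nat, i = (p : Int) := ⟨i.toNat, (Int.toNat_of_nonneg hi0).symm⟩
  obtain ⟨q, rfl⟩ : ∃ q : Nat, j = (q : Int) := ⟨j.toNat, (Int.toNat_of_nonneg hj0).symm⟩
  have hp : p < (PySem.List.pyGetD matr 0 []).length := by exact_mod_cast him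
  have hq : q < (PySem.List.pyGetD matr 0 []).length := by exact_mod_cast hjm
  unfold pvLt
  rw [pvK_eval matr p hp, pvK_eval matr q hq]
  rcases matr with _ | ⟨a, t⟩
  · rw [show (PySem.List.pyGetD ([] : List (List Int)) (0 : Int) []) = [] by simp [pysem]] at hp
    simp at hp
  rcases t with _ | ⟨b, t⟩
  · -- single row: A's diff is -row[i], B's is 0; the row is non-decreasing here
    have hpa : p < a.length := by rwa [pvFirst] at hp
    have hqa : q < a.length := by rwa [pvFirst] at hq
    have hpw : a.Pairwise (· ≤ ·) := by
      by_contra h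
      exact hND ⟨rfl, by simpa using h⟩
    rw [pvColDiff_single, pvColDiff_single] at hcase
    rw [show ((List.length [a] : Nat) : Int) - 1 = (0 : Int) by norm_num, pvFirst] at *
    rw [pvGetD_elem a p hpa, pvGetD_elem a q hqa] at *
    have hpq : p < q := by
      rcases hcase with h | h
      · by_contra hc
        rcases Nat.lt_or_ge q p with h2 | h2
        · have := (List.pairwise_iff_getElem.mp hpw) q p hqa hpa h2
          omega
        · have : q = p := by omega
          subst this; omega
      · exact_mod_cast h.2
    right
    constructor
    · ring
    · exact_mod_cast hpq
  · -- at least two rows: A's diff equals B's last-minus-first difference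
    have h2 : 2 ≤ (a :: b :: t).length := by simp
    rw [pvColDiff_ge2 _ h2, pvColDiff_ge2 _ h2] at hcase
    omega

theorem rec3_sokol_changed : Claim_changed_rec3_sokol := by
  unfold Claim_changed_rec3_sokol; decide
theorem rec3_sokol_tight : Claim_exact_rec3_sokol := by
  unfold Claim_exact_rec3_sokol
  intro matr _ _ hD heq
  obtain ⟨h1, hnp⟩ := hD
  obtain ⟨a, rfl⟩ := List.length_eq_one_iff.mp h1
  have hnp' : ¬ a.Pairwise (· ≤ ·) := by simpa using hnp
  have hRpw : (pvR (PySem.List.pyGetD [a] (0 : Int) []).length).Pairwise (pvLt (pvK [a])) := by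
    rw [List.pairwise_iff_getElem]
    intro x y hx hy hxy
    rw [pvR_getElem _ _ hx, pvR_getElem _ _ hy]
    have hx' : x < a.length := by rw [pvR_length] at hx; simpa [pvFirst] using hx
    have hy' : y < a.length := by rw [pvR_length] at hy; simpa [pvFirst] using hy
    unfold pvLt
    rw [pvK_single a x hx', pvK_single a y hy']
    exact Or.inr ⟨rfl, by exact_mod_cast hxy⟩
  have hB : rec3_sokol_alt [a] = pvR (PySem.List.pyGetD [a] (0 : Int) []).length := by
    rw [pvB_shape]
    exact List.Perm.eq_of_pairwise (fun u v _ _ h h' => by unfold pvLt at h h'; omega)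
      (pvSorted2_pairwise_lt _ _ (pvR_nodup _)) hRpw (PySem.List.sorted2_perm _ _ _ _)
  have hApw : (rec3_sokol [a]).Pairwise (pvLt (fun i => -(pvColDiff [a] i))) := by
    rw [pvA_shape]
    exact (pvA_props (pvColDiff [a]) _ _ (by intro i j _ _ h; simp only [pvLt]; omega)).1
  rw [heq, hB] at hApw
  apply hnp'
  rw [List.pairwise_iff_getElem]
  intro x y hx hy hxy
  have hx' : x < (pvR (PySem.List.pyGetD [a] (0 : Int) []).length).length := by
    rw [pvR_length]; simpa [pvFirst] using hx
  have hy' : y < (pvR (PySem.List.pyGetD [a] (0 : Int) []).length).length := by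
    rw [pvR_length]; simpa [pvFirst] using hy
  have hple := (List.pairwise_iff_getElem.mp hApw) x y hx' hy' hxy
  rw [pvR_getElem _ _ hx', pvR_getElem _ _ hy'] at hple
  simp only [pvLt] at hple
  rw [pvColDiff_single, pvColDiff_single, pvGetD_elem a x hx, pvGetD_elem a y hy] at hple
  omega
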